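-- pv_equiv track=rewrite | github.com/maddenvvs/advent-of-code-2020 | Python3/Day-9/solution.py | find_encryption_weakness_value
-- ===== SOURCE A (Python) =====
-- from collections import defaultdict, deque
-- from typing import Deque, Dict, Generator, List, Optional
--
-- def find_encryption_weakness_value(cypher: List[int], target_value: int) -> Optional[int]:
--     l, temp_sum = 0, 0
--     min_queue: Deque[int] = deque()
--     max_queue: Deque[int] = deque()
--
--     for r, next_num in enumerate(cypher):
--         temp_sum += next_num
--
--         while temp_sum > target_value:
--             num_to_remove = cypher[l]
--
--             if min_queue and min_queue[0] == num_to_remove: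
--                 min_queue.popleft()
--
--             if max_queue and max_queue[0] == num_to_remove:
--                 max_queue.popleft()
--
--             temp_sum -= num_to_remove
--             l += 1
--
--         while min_queue and min_queue[-1] > next_num:
--             min_queue.pop()
--         min_queue.append(next_num)
--
--         while max_queue and max_queue[-1] < next_num:
--             max_queue.pop()
--         max_queue.append(next_num)
--
--         if temp_sum == target_value:
--             return min_queue[0] + max_queue[0]
--
--     return None
-- ===== SOURCE B (Python) =====
-- def find_encryption_weakness_value(cypher, target_value):
--     l, temp_sum = 0, 0
--     for r, next_num in enumerate(cypher):
--         temp_sum += next_num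
--         while temp_sum > target_value:
--             temp_sum -= cypher[l]
--             l += 1
--         if temp_sum == target_value:
--             window = cypher[l:r + 1]
--             return min(window) + max(window)
--     return None
-- ===== Notes on version B (the rewrite author's own statement) =====
-- stated objective: simpler
-- what changed: Removed both monotonic deques and their maintenance/front-pop bookkeeping; B keeps only the two-pointer window (l, temp_sum) and, at the single point where the window sum hits the target, computes min(window)+max(window) by scanning the slice cypher[l:r+1] once.
-- intended difference: On all-positive inputs with positive target where some element greater than target_value occurs before the first window summing to target_value, A's max-deque retains that oversized element (front-pops never match it), so A returns min(window) plus a stale value instead of min(window)+max(window); B returns the intended min+max of the matching window, e.g. A([10,3],3)=13 vs B=6. — e.g. on find_encryption_weakness_value([10, 3], 3): A returns some 13, B returns some 6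
-- outside the precondition, e.g. on find_encryption_weakness_value([5], 0): A returns 10, B raises ValueError; on find_encryption_weakness_value([5, -1, 2], 1): A returns 4, B returns 1
import Mathlib
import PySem

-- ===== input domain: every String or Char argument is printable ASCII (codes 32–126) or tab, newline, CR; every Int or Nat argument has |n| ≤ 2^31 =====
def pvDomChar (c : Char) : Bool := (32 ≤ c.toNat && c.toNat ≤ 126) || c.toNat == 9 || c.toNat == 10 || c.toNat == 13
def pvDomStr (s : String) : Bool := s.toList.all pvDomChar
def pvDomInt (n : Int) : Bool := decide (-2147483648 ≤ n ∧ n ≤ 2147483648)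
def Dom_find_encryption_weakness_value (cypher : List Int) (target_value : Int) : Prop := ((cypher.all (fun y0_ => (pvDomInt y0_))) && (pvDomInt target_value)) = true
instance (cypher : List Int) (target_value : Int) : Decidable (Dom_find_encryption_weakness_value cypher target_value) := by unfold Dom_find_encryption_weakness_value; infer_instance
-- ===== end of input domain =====

-- B deletes A's two monotonic deques and computes min/max by scanning the matched window slice once (objective: simpler).
-- ===== PORT A =====
-- the `while temp_sum > target_value:` shrink loop of A; `fuel` only makes the
-- recursion structural (cypher.length + 1 never runs out before Python decides,
-- since l increments every pass and cypher[l] raises IndexError once l ≥ len);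
-- `none` = the IndexError path.
def pvShrinkA (cypher : List Int) (target_value : Int) :
    Nat → Nat → Int → List Int → List Int → Option (Nat × Int × List Int × List Int)
  | 0, _, _, _, _ => none
  | fuel+1, l, ts, mq, xq =>
    if ts > target_value then
      match PySem.List.pyGet? cypher (l : Int) with
      | none => none
      | some v =>
        let mq' := if mq.head? = some v then mq.tail else mq
        let xq' := if xq.head? = some v then xq.tail else xq
        pvShrinkA cypher target_value fuel (l+1) (ts - v) mq' xq'
    else some (l, ts, mq, xq)

-- `while q and q[-1] > v: q.pop()` — popping from the back of the deque while the
-- predicate holds = dropWhile on the reversed list (exact)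
def pvPopBack (p : Int → Bool) (q : List Int) : List Int := (q.reverse.dropWhile p).reverse

-- the `for r, next_num in enumerate(cypher)` loop of A (r itself is unused by A)
def pvGoA (cypher : List Int) (target_value : Int) :
    List Int → Nat → Int → List Int → List Int → Option Int
  | [], _, _, _, _ => none
  | v :: rest, l, ts, mq, xq =>
    match pvShrinkA cypher target_value (cypher.length + 1) l (ts + v) mq xq with
    | none => none
    | some (l', ts', mq0, xq0) =>
      let mq' := pvPopBack (fun e => decide (v < e)) mq0 ++ [v]
      let xq' := pvPopBack (fun e => decide (e < v)) xq0 ++ [v]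
      if ts' = target_value then some (mq'.headI + xq'.headI)
      else pvGoA cypher target_value rest l' ts' mq' xq'

def find_encryption_weakness_value (cypher : List Int) (target_value : Int) : Option Int :=
  pvGoA cypher target_value cypher 0 0 [] []

-- ===== PORT B =====
-- the same `while temp_sum > target_value:` shrink loop, without any deques
def pvShrinkB (cypher : List Int) (target_value : Int) : Nat → Nat → Int → Option (Nat × Int)
  | 0, _, _ => none
  | fuel+1, l, ts =>
    if ts > target_value then
      match PySem.List.pyGet? cypher (l : Int) with
      | none => none
      | some v => pvShrinkB cypher target_value fuel (l+1) (ts - v)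
    else some (l, ts)

-- `for r, next_num in enumerate(cypher)`; on a match return min(window)+max(window)
-- over window = cypher[l:r+1] (none = Python's ValueError on an empty window)
def pvGoB (cypher : List Int) (target_value : Int) : List Int → Nat → Nat → Int → Option Int
  | [], _, _, _ => none
  | v :: rest, r, l, ts =>
    match pvShrinkB cypher target_value (cypher.length + 1) l (ts + v) with
    | none => none
    | some (l', ts') =>
      if ts' = target_value then
        let w := PySem.List.slice cypher (some (l' : Int)) (some ((r : Int) + 1))
        match PySem.List.min? w (fun x => x), PySem.List.max? w (fun x => x) with
        | some m, some M => some (m + M)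
        | _, _ => none
      else pvGoB cypher target_value rest (r+1) l' ts'

def find_encryption_weakness_value_alt (cypher : List Int) (target_value : Int) : Option Int :=
  pvGoB cypher target_value cypher 0 0 0

-- ===== PRECONDITION & SPEC =====
-- Pre_ admits the problem's natural domain (positive entries, positive target) and,
-- in addition, any input whose prefix sums never exceed target_value (there the shrink
-- loop never runs).  Outside both, non-positive values let the shrink loop empty or
-- overrun the window, where A raises IndexError or returns deque leftovers (e.g.
-- A([5],0) = 10, A([5,-1,2],1) = 4) while B raises ValueError on min of an empty
-- slice or returns the true min+max — excluded as values of an overrun A's accident.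
def Pre_find_encryption_weakness_value (cypher : List Int) (target_value : Int) : Prop :=
  (0 < target_value ∧ ∀ x ∈ cypher, 0 < x) ∨
  (∀ r < cypher.length, (cypher.take (r+1)).sum ≤ target_value)
instance (cypher : List Int) (target_value : Int) : Decidable (Pre_find_encryption_weakness_value cypher target_value) := by unfold Pre_find_encryption_weakness_value; infer_instance

def pvWitness_find_encryption_weakness_value : List Int × Int := ([1, 2], 3)

-- On all-positive inputs with positive target where an element greater than target_value
-- occurs before the first window summing to target_value, A returns min(window) plus a
-- stale deque element instead of min(window)+max(window); B returns the intended min+max.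
def D_find_encryption_weakness_value (cypher : List Int) (target_value : Int) : Prop :=
  0 < target_value ∧ (∀ x ∈ cypher, 0 < x) ∧
  ∃ r < cypher.length, (∃ l ≤ r, ((cypher.drop l).take (r+1-l)).sum = target_value) ∧
    (∀ j < r, ¬ ∃ l ≤ j, ((cypher.drop l).take (j+1-l)).sum = target_value) ∧
    ∃ x ∈ cypher.take r, target_value < x
instance (cypher : List Int) (target_value : Int) : Decidable (D_find_encryption_weakness_value cypher target_value) := by unfold D_find_encryption_weakness_value; infer_instance

def Spec_find_encryption_weakness_value (cypher : List Int) (target_value : Int) (out : Option Int) : Prop := ¬ D_find_encryption_weakness_value cypher target_value → out = find_encryption_weakness_value_alt cypher target_value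
instance (cypher : List Int) (target_value : Int) (out : Option Int) : Decidable (Spec_find_encryption_weakness_value cypher target_value out) := by unfold Spec_find_encryption_weakness_value; infer_instance

def pvDiffWitness_find_encryption_weakness_value : List Int × Int := ([10, 3], 3)
def pvDiffWitnessOut_find_encryption_weakness_value : (Option Int) × (Option Int) := (some 13, some 6)

-- ===== CLAIM (what is proved, stated in full; the proofs are below) =====
def Claim_unchanged_find_encryption_weakness_value : Prop := ∀ (cypher : List Int) (target_value : Int), Dom_find_encryption_weakness_value cypher target_value → Pre_find_encryption_weakness_value cypher target_value → Spec_find_encryption_weakness_value cypher target_value (find_encryption_weakness_value cypher target_value)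
def Claim_changed_find_encryption_weakness_value : Prop := Dom_find_encryption_weakness_value (pvDiffWitness_find_encryption_weakness_value.1) (pvDiffWitness_find_encryption_weakness_value.2) ∧ Pre_find_encryption_weakness_value (pvDiffWitness_find_encryption_weakness_value.1) (pvDiffWitness_find_encryption_weakness_value.2) ∧ D_find_encryption_weakness_value (pvDiffWitness_find_encryption_weakness_value.1) (pvDiffWitness_find_encryption_weakness_value.2) ∧ find_encryption_weakness_value (pvDiffWitness_find_encryption_weakness_value.1) (pvDiffWitness_find_encryption_weakness_value.2) = pvDiffWitnessOut_find_encryption_weakness_value.1 ∧ find_encryption_weakness_value_alt (pvDiffWitness_find_encryption_weakness_value.1) (pvDiffWitness_find_encryption_weakness_value.2) = pvDiffWitnessOut_find_encryption_weakness_value.2 ∧ pvDiffWitnessOut_find_encryption_weakness_value.1 ≠ pvDiffWitnessOut_find_encryption_weakness_value.2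
def Claim_exact_find_encryption_weakness_value : Prop := ∀ (cypher : List Int) (target_value : Int), Dom_find_encryption_weakness_value cypher target_value → Pre_find_encryption_weakness_value cypher target_value → D_find_encryption_weakness_value cypher target_value → find_encryption_weakness_value cypher target_value ≠ find_encryption_weakness_value_alt cypher target_value


-- ===== LEMMAS AND PROOFS =====

-- proof-only helpers: window slices, the window-match test and the monotonic-deque fold
def pvWin (c : List Int) (a b : Nat) : List Int := (c.drop a).take (b - a)

def pvMatchAt (cypher : List Int) (target_value : Int) (r : Nat) : Bool :=
  (List.range (r+1)).any (fun l => decide ((pvWin cypher l (r+1)).sum = target_value))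

theorem pvM_iff (cy : List Int) (t : Int) (r : Nat) :
    (∃ l ≤ r, ((cy.drop l).take (r+1-l)).sum = t) ↔ pvMatchAt cy t r = true := by
  unfold pvMatchAt pvWin
  simp [List.any_eq_true, List.mem_range, Nat.lt_succ_iff]

def pvPushMin (q : List Int) (v : Int) : List Int := pvPopBack (fun e => decide (v < e)) q ++ [v]
def pvPushMax (q : List Int) (v : Int) : List Int := pvPopBack (fun e => decide (e < v)) q ++ [v]
def pvDMin (w : List Int) : List Int := w.foldl pvPushMin []
def pvDMax (w : List Int) : List Int := w.foldl pvPushMax []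

theorem pv_mem_popBack {p : Int → Bool} {q : List Int} {e : Int} (h : e ∈ pvPopBack p q) : e ∈ q := by
  unfold pvPopBack at h
  have := (List.dropWhile_suffix p (l := q.reverse)).subset (by simpa using h)
  simpa using this

theorem pv_popBack_cons {p : Int → Bool} {q : List Int} {v : Int} (hv : p v = false) :
    pvPopBack p (v :: q) = v :: pvPopBack p q := by
  unfold pvPopBack
  rw [show (v :: q).reverse = q.reverse ++ [v] by simp, List.dropWhile_append]
  by_cases h : (q.reverse.dropWhile p).isEmpty
  · simp_all [List.dropWhile_cons, List.isEmpty_iff]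
  · simp_all

theorem pv_popBack_all {p : Int → Bool} {q : List Int} (h : ∀ e ∈ q, p e = true) :
    pvPopBack p q = [] := by
  unfold pvPopBack
  rw [List.dropWhile_eq_nil_iff.mpr (by intro x hx; exact h x (by simpa using hx))]
  rfl

theorem pv_pushMin_all_gt {q : List Int} {x : Int} (h : ∀ e ∈ q, x < e) :
    pvPushMin q x = [x] := by
  unfold pvPushMin
  rw [pv_popBack_all (by intro e he; simpa using h e he)]
  rfl

theorem pv_pushMin_cons_le {q : List Int} {v x : Int} (h : v ≤ x) :
    pvPushMin (v :: q) x = v :: pvPushMin q x := by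
  unfold pvPushMin
  rw [pv_popBack_cons (by simpa using not_lt.mpr h)]
  rfl

theorem pv_mem_pushMin {q : List Int} {x e : Int} (h : e ∈ pvPushMin q x) : e = x ∨ e ∈ q := by
  unfold pvPushMin at h
  rcases List.mem_append.mp h with h | h
  · exact Or.inr (pv_mem_popBack h)
  · simp_all

theorem pv_mem_foldl_pushMin : ∀ (w q : List Int) (e : Int), e ∈ w.foldl pvPushMin q → e ∈ q ∨ e ∈ w := by
  intro w
  induction w with
  | nil => intro q e h; exact Or.inl h
  | cons y rest ih =>
    intro q e h
    rcases ih (pvPushMin q y) e h with h | h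
    · rcases pv_mem_pushMin h with h | h
      · simp [h]
      · exact Or.inl h
    · simp [h]

theorem pv_foldl_pushMin_ne_nil : ∀ (w q : List Int), w ≠ [] → w.foldl pvPushMin q ≠ [] := by
  intro w
  induction w with
  | nil => intro q h; exact absurd rfl h
  | cons y rest ih =>
    intro q _
    by_cases hr : rest = []
    · subst hr; simp [pvPushMin]
    · exact ih (pvPushMin q y) hr

theorem pv_L1 : ∀ (w q : List Int) (v : Int), (∀ e ∈ q, v ≤ e) → (∀ e ∈ w, v ≤ e) →
    w.foldl pvPushMin (v :: q) = v :: w.foldl pvPushMin q := by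
  intro w
  induction w with
  | nil => intro q v _ _; rfl
  | cons x rest ih =>
    intro q v hq hw
    have hvx : v ≤ x := hw x (by simp)
    rw [List.foldl_cons, List.foldl_cons, pv_pushMin_cons_le hvx]
    exact ih (pvPushMin q x) v
      (by intro e he; rcases pv_mem_pushMin he with h | h
          · exact h ▸ hvx
          · exact hq e h)
      (by intro e he; exact hw e (by simp [he]))

theorem pv_Lc : ∀ (w q1 q2 : List Int) (b : Int), (∀ e ∈ q1, b ≤ e) → (∀ e ∈ q2, b ≤ e) →
    (∃ x ∈ w, x < b) → w.foldl pvPushMin q1 = w.foldl pvPushMin q2 := by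
  intro w
  induction w with
  | nil => intro _ _ _ _ _ h; simp at h
  | cons y rest ih =>
    intro q1 q2 b h1 h2 hx
    rw [List.foldl_cons, List.foldl_cons]
    by_cases hy : y < b
    · have e1 : pvPushMin q1 y = [y] := pv_pushMin_all_gt (fun e he => lt_of_lt_of_le hy (h1 e he))
      have e2 : pvPushMin q2 y = [y] := pv_pushMin_all_gt (fun e he => lt_of_lt_of_le hy (h2 e he))
      rw [e1, e2]
    · rcases hx with ⟨x, hxw, hxb⟩
      have hxr : x ∈ rest := by
        rcases List.mem_cons.mp hxw with h | h
        · exact absurd (h ▸ hxb) hy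
        · exact h
      exact ih (pvPushMin q1 y) (pvPushMin q2 y) b
        (by intro e he; rcases pv_mem_pushMin he with h | h
            · exact h ▸ not_lt.mp hy
            · exact h1 e h)
        (by intro e he; rcases pv_mem_pushMin he with h | h
            · exact h ▸ not_lt.mp hy
            · exact h2 e h)
        ⟨x, hxr, hxb⟩

theorem pv_head_pushMin_of_exists {q : List Int} {z : Int} (h : ∃ e ∈ q, ¬ z < e) :
    (pvPushMin q z).head? = q.head? := by
  unfold pvPushMin pvPopBack
  have hne : q.reverse.dropWhile (fun e => decide (z < e)) ≠ [] := by
    intro hnil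
    rcases h with ⟨e, he, hez⟩
    have := List.dropWhile_eq_nil_iff.mp hnil e (by simpa using he)
    simp_all
  obtain ⟨pre, hpre⟩ := List.dropWhile_suffix (l := q.reverse) (fun e => decide (z < e))
  have hq : q = (q.reverse.dropWhile (fun e => decide (z < e))).reverse ++ pre.reverse := by
    have := congrArg List.reverse hpre
    simpa using this.symm
  have hsr : (q.reverse.dropWhile (fun e => decide (z < e))).reverse ≠ [] := by simpa using hne
  obtain ⟨a, as, ha⟩ := List.exists_cons_of_ne_nil hsr
  rw [ha]
  conv_rhs => rw [hq, ha]
  simp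

theorem pv_L5 : ∀ (w q : List Int) (h c : Int), q.head? = some h → h ≤ c →
    ∃ h', (w.foldl pvPushMin q).head? = some h' ∧ h' ≤ c := by
  intro w
  induction w with
  | nil => intro q h c hh hc; exact ⟨h, hh, hc⟩
  | cons z rest ih =>
    intro q h c hh hc
    rw [List.foldl_cons]
    by_cases hall : ∀ e ∈ q, z < e
    · have : pvPushMin q z = [z] := pv_pushMin_all_gt hall
      rw [this]
      have hz : z < h := hall h (List.mem_of_mem_head? hh)
      exact ih [z] z c rfl (le_of_lt (lt_of_lt_of_le hz hc))
    · push_neg at hall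
      have : (pvPushMin q z).head? = q.head? :=
        pv_head_pushMin_of_exists (by rcases hall with ⟨e, he, hez⟩; exact ⟨e, he, not_lt.mpr hez⟩)
      exact ih (pvPushMin q z) h c (this ▸ hh) hc

theorem pv_L4 : ∀ (w : List Int) (x : Int), x ∈ w →
    ∃ h, (pvDMin w).head? = some h ∧ h ≤ x := by
  intro w
  induction w with
  | nil => intro x hx; simp at hx
  | cons y rest ih =>
    intro x hx
    have hD : pvDMin (y :: rest) = rest.foldl pvPushMin [y] := by
      simp [pvDMin, pvPushMin, pvPopBack]
    rcases List.mem_cons.mp hx with hxy | hxr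
    · subst hxy
      rw [hD]
      exact pv_L5 rest [x] x x rfl le_rfl
    · by_cases hall : ∀ e ∈ rest, y ≤ e
      · rw [hD, pv_L1 rest [] y (by simp) hall]
        exact ⟨y, rfl, hall x hxr⟩
      · push_neg at hall
        rcases hall with ⟨e, he, hey⟩
        rw [hD, pv_Lc rest [y] [] y (by simp) (by simp) ⟨e, he, hey⟩]
        exact ih x hxr

theorem pv_frontpop_min (v : Int) (w : List Int) :
    (if (pvDMin (v :: w)).head? = some v then (pvDMin (v :: w)).tail else pvDMin (v :: w)) = pvDMin w := by
  have hD : pvDMin (v :: w) = w.foldl pvPushMin [v] := by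
    simp [pvDMin, pvPushMin, pvPopBack]
  by_cases hall : ∀ e ∈ w, v ≤ e
  · rw [hD, pv_L1 w [] v (by simp) hall]
    simp [pvDMin]
  · push_neg at hall
    rcases hall with ⟨x, hxw, hxv⟩
    rw [hD, pv_Lc w [v] [] v (by simp) (by simp) ⟨x, hxw, hxv⟩]
    rcases pv_L4 w x hxw with ⟨h, hh, hhx⟩
    have hh' : (List.foldl pvPushMin [] w).head? = some h := hh
    rw [hh', if_neg (by simp; omega)]
    rfl

theorem pv_dmin_snoc (w : List Int) (v : Int) : pvDMin (w ++ [v]) = pvPushMin (pvDMin w) v := by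
  simp [pvDMin]

theorem pv_dmin_head_min {w : List Int} (hw : w ≠ []) :
    ∃ m, (pvDMin w).head? = some m ∧ m ∈ w ∧ ∀ x ∈ w, m ≤ x := by
  have hne : pvDMin w ≠ [] := pv_foldl_pushMin_ne_nil w [] hw
  rcases List.exists_mem_of_ne_nil _ hne with ⟨m0, _⟩
  rcases hx : (pvDMin w).head? with _ | m
  · simp [List.head?_eq_none_iff] at hx; exact absurd hx hne
  · refine ⟨m, rfl, ?_, ?_⟩
    · have : m ∈ pvDMin w := List.mem_of_mem_head? hx
      rcases pv_mem_foldl_pushMin w [] m this with h | h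
      · simp at h
      · exact h
    · intro x hxw
      rcases pv_L4 w x hxw with ⟨h, hh, hhx⟩
      rw [hx] at hh
      have := Option.some.inj hh
      omega

-- ---------- max side via negation mirror ----------

theorem pv_popBack_map_neg (z : Int) (q : List Int) :
    pvPopBack (fun e => decide (-z < e)) (q.map (fun x => -x)) =
      (pvPopBack (fun e => decide (e < z)) q).map (fun x => -x) := by
  unfold pvPopBack
  rw [← List.map_reverse, List.dropWhile_map, List.map_reverse]
  have hpred : ((fun e => decide (-z < e)) ∘ fun x : Int => -x) = (fun e => decide (e < z)) := by
    funext e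
    simp
  rw [hpred]

theorem pv_pushMin_neg (q : List Int) (v : Int) :
    pvPushMin (q.map (fun x => -x)) (-v) = (pvPushMax q v).map (fun x => -x) := by
  unfold pvPushMin pvPushMax
  rw [pv_popBack_map_neg v q]
  simp

theorem pv_foldl_pushMin_neg : ∀ (w q : List Int),
    (w.map (fun x => -x)).foldl pvPushMin (q.map (fun x => -x)) =
      (w.foldl pvPushMax q).map (fun x => -x) := by
  intro w
  induction w with
  | nil => intro q; rfl
  | cons y rest ih =>
    intro q
    rw [List.map_cons, List.foldl_cons, List.foldl_cons, pv_pushMin_neg]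
    exact ih (pvPushMax q y)

theorem pv_dmax_eq (w : List Int) :
    pvDMax w = (pvDMin (w.map (fun x => -x))).map (fun x => -x) := by
  unfold pvDMin pvDMax
  rw [show ([] : List Int) = ([] : List Int).map (fun x => -x) from rfl, pv_foldl_pushMin_neg]
  simp [List.map_map, Function.comp_def]

theorem pv_frontpop_max (v : Int) (w : List Int) :
    (if (pvDMax (v :: w)).head? = some v then (pvDMax (v :: w)).tail else pvDMax (v :: w)) = pvDMax w := by
  have h1 := pv_frontpop_min (-v) (w.map (fun x => -x))
  rw [pv_dmax_eq (v :: w), pv_dmax_eq w, List.map_cons]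
  set s := pvDMin ((-v) :: w.map (fun x => -x)) with hs
  have hcond : ((s.map (fun x => -x)).head? = some v) ↔ (s.head? = some (-v)) := by
    cases s with
    | nil => simp
    | cons a tl => simp; omega
  by_cases hc : s.head? = some (-v)
  · rw [if_pos (hcond.mpr hc)]
    rw [if_pos hc] at h1
    rw [← h1]
    cases s <;> simp
  · rw [if_neg (fun h => hc (hcond.mp h))]
    rw [if_neg hc] at h1
    rw [h1]

theorem pv_dmax_snoc (w : List Int) (v : Int) : pvDMax (w ++ [v]) = pvPushMax (pvDMax w) v := by
  simp [pvDMax]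

theorem pv_dmax_head_max {w : List Int} (hw : w ≠ []) :
    ∃ m, (pvDMax w).head? = some m ∧ m ∈ w ∧ ∀ x ∈ w, x ≤ m := by
  have hw' : w.map (fun x : Int => -x) ≠ [] := by simpa using hw
  rcases pv_dmin_head_min hw' with ⟨m, hm, hmem, hmin⟩
  refine ⟨-m, ?_, ?_, ?_⟩
  · rw [pv_dmax_eq w, List.head?_map, hm]; rfl
  · rcases List.mem_map.mp hmem with ⟨x, hx, hxm⟩
    have : -m = x := by omega
    exact this ▸ hx
  · intro x hx
    have := hmin (-x) (List.mem_map.mpr ⟨x, hx, rfl⟩)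
    omega

theorem pv_headI_eq {q : List Int} {m : Int} (h : q.head? = some m) : q.headI = m := by
  cases q <;> simp_all

-- ---------- window lemmas ----------

theorem pv_win_cons {cy : List Int} {a b : Nat} (ha : a < cy.length) (hab : a < b) :
    pvWin cy a b = cy[a] :: pvWin cy (a+1) b := by
  unfold pvWin
  rw [List.drop_eq_getElem_cons ha, show b - a = (b - (a+1)) + 1 by omega]
  rfl

theorem pv_win_snoc {cy : List Int} {a b : Nat} (hab : a ≤ b) (hb : b < cy.length) :
    pvWin cy a (b+1) = pvWin cy a b ++ [cy[b]] := by
  unfold pvWin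
  rw [show b + 1 - a = (b - a) + 1 by omega, List.take_add_one]
  congr 1
  rw [List.getElem?_drop, show a + (b - a) = b by omega, List.getElem?_eq_getElem hb]
  rfl

theorem pv_win_empty {cy : List Int} {a b : Nat} (h : b ≤ a) : pvWin cy a b = [] := by
  unfold pvWin
  rw [Nat.sub_eq_zero_of_le h]
  rfl

theorem pv_win_drop_nil {cy : List Int} {a b : Nat} (h : cy.length ≤ a) : pvWin cy a b = [] := by
  unfold pvWin
  rw [List.drop_eq_nil_of_le h]
  simp

theorem pv_win_sum_step {cy : List Int} (hpos : ∀ x ∈ cy, 0 < x) (l b : Nat) :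
    (pvWin cy (l+1) b).sum ≤ (pvWin cy l b).sum := by
  by_cases h1 : l < cy.length
  · by_cases h2 : l < b
    · rw [pv_win_cons h1 h2, List.sum_cons]
      have := hpos cy[l] (List.getElem_mem h1)
      linarith
    · rw [pv_win_empty (show b ≤ l by omega), pv_win_empty (show b ≤ l + 1 by omega)]
  · rw [pv_win_drop_nil (show cy.length ≤ l by omega), pv_win_drop_nil (show cy.length ≤ l + 1 by omega)]

theorem pv_win_sum_mono {cy : List Int} (hpos : ∀ x ∈ cy, 0 < x) {k l : Nat} (b : Nat) (hkl : k ≤ l) :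
    (pvWin cy l b).sum ≤ (pvWin cy k b).sum := by
  induction l, hkl using Nat.le_induction with
  | base => exact le_rfl
  | succ n hn ih => exact le_trans (pv_win_sum_step hpos n b) ih

theorem pv_win_sum_strict {cy : List Int} (hpos : ∀ x ∈ cy, 0 < x) {k l b : Nat}
    (hkl : k < l) (hklen : k < cy.length) (hkb : k < b) :
    (pvWin cy l b).sum < (pvWin cy k b).sum := by
  have h1 : (pvWin cy l b).sum ≤ (pvWin cy (k+1) b).sum := pv_win_sum_mono hpos b hkl
  rw [pv_win_cons hklen hkb, List.sum_cons]
  have := hpos cy[k] (List.getElem_mem hklen)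
  linarith

theorem pv_win_clamp {cy : List Int} {a b : Nat} (h : cy.length ≤ b) :
    pvWin cy a b = pvWin cy a cy.length := by
  unfold pvWin
  rw [List.take_of_length_le (by simp only [List.length_drop]; omega),
      List.take_of_length_le (by simp only [List.length_drop]; omega)]

-- ---------- shrink-loop spec ----------

theorem pv_shrink_spec (cy : List Int) (t : Int) (hp : 0 < t) (hpos : ∀ x ∈ cy, 0 < x)
    (r : Nat) (hr : r < cy.length) :
    ∀ fuel l, cy.length + 1 ≤ fuel + l → l ≤ r + 1 →
    ∃ l', l ≤ l' ∧ l' ≤ r + 1 ∧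
      (∀ k, l ≤ k → k < l' → t < (pvWin cy k (r+1)).sum) ∧
      (pvWin cy l' (r+1)).sum ≤ t ∧
      pvShrinkB cy t fuel l (pvWin cy l (r+1)).sum = some (l', (pvWin cy l' (r+1)).sum) ∧
      pvShrinkA cy t fuel l (pvWin cy l (r+1)).sum (pvDMin (pvWin cy l r)) (pvDMax (pvWin cy l r)) =
        some (l', (pvWin cy l' (r+1)).sum, pvDMin (pvWin cy l' r), pvDMax (pvWin cy l' r)) := by
  intro fuel
  induction fuel with
  | zero => intro l hf hl; omega
  | succ fuel ih =>
    intro l hf hl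
    by_cases hts : (pvWin cy l (r+1)).sum > t
    · have hlr : l ≤ r := by
        by_contra h
        rw [show l = r + 1 by omega, pv_win_empty le_rfl] at hts
        simp at hts
        omega
      have hllen : l < cy.length := by omega
      have hget : PySem.List.pyGet? cy (l : Int) = some cy[l] := by
        rw [PySem.List.pyGet?_natCast]
        exact List.getElem?_eq_getElem hllen
      have hsum : (pvWin cy l (r+1)).sum - cy[l] = (pvWin cy (l+1) (r+1)).sum := by
        rw [pv_win_cons hllen (by omega), List.sum_cons]
        ring
      have hqmin : (if (pvDMin (pvWin cy l r)).head? = some cy[l] then (pvDMin (pvWin cy l r)).tail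
            else pvDMin (pvWin cy l r)) = pvDMin (pvWin cy (l+1) r) := by
        by_cases hlr2 : l < r
        · rw [pv_win_cons hllen hlr2]
          exact pv_frontpop_min _ _
        · rw [pv_win_empty (show r ≤ l by omega), pv_win_empty (show r ≤ l + 1 by omega)]
          simp [pvDMin]
      have hqmax : (if (pvDMax (pvWin cy l r)).head? = some cy[l] then (pvDMax (pvWin cy l r)).tail
            else pvDMax (pvWin cy l r)) = pvDMax (pvWin cy (l+1) r) := by
        by_cases hlr2 : l < r
        · rw [pv_win_cons hllen hlr2]
          exact pv_frontpop_max _ _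
        · rw [pv_win_empty (show r ≤ l by omega), pv_win_empty (show r ≤ l + 1 by omega)]
          simp [pvDMax]
      obtain ⟨l', h1, h2, h3, h4, h5, h6⟩ := ih (l+1) (by omega) (by omega)
      refine ⟨l', by omega, h2, ?_, h4, ?_, ?_⟩
      · intro k hk1 hk2
        rcases eq_or_lt_of_le hk1 with h | h
        · exact h ▸ hts
        · exact h3 k h hk2
      · simp only [pvShrinkB, if_pos hts, hget]
        rw [hsum]
        exact h5
      · simp only [pvShrinkA, if_pos hts, hget]
        rw [hqmin, hqmax, hsum]
        exact h6
    · refine ⟨l, le_rfl, hl, by omega, not_lt.mp hts, ?_, ?_⟩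
      · simp only [pvShrinkB, if_neg hts]
      · simp only [pvShrinkA, if_neg hts]

theorem pv_shrinkA_shape (cy : List Int) (t : Int) :
    ∀ fuel l (ts : Int) (mq xq : List Int) l' (ts' : Int),
    pvShrinkB cy t fuel l ts = some (l', ts') →
    ∃ mq' xq', pvShrinkA cy t fuel l ts mq xq = some (l', ts', mq', xq') := by
  intro fuel
  induction fuel with
  | zero => intro l ts mq xq l' ts' h; simp [pvShrinkB] at h
  | succ fuel ih =>
    intro l ts mq xq l' ts' h
    by_cases hts : ts > t
    · simp only [pvShrinkB, if_pos hts] at h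
      simp only [pvShrinkA, if_pos hts]
      cases hg : PySem.List.pyGet? cy (l : Int) with
      | none => rw [hg] at h; simp at h
      | some v =>
        rw [hg] at h
        exact ih _ _ _ _ _ _ h
    · simp only [pvShrinkB, if_neg hts] at h
      simp only [pvShrinkA, if_neg hts]
      obtain ⟨h1, h2⟩ := Prod.mk.injEq .. ▸ (Option.some.inj h)
      exact ⟨mq, xq, by rw [h1, h2]⟩

-- ---------- the match condition ----------

theorem pv_matchAt_iff {cy : List Int} {t : Int} (hp : 0 < t) (hpos : ∀ x ∈ cy, 0 < x)
    {r l' : Nat} (hr : r < cy.length) (hl' : l' ≤ r + 1)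
    (hbelow : ∀ k, k < l' → t < (pvWin cy k (r+1)).sum)
    (hle : (pvWin cy l' (r+1)).sum ≤ t) :
    pvMatchAt cy t r = true ↔ (pvWin cy l' (r+1)).sum = t := by
  unfold pvMatchAt
  simp only [List.any_eq_true, List.mem_range, decide_eq_true_eq]
  constructor
  · rintro ⟨k, hk, hkeq⟩
    rcases lt_trichotomy k l' with h | h | h
    · exact absurd hkeq (by have := hbelow k h; omega)
    · exact h ▸ hkeq
    · have h2 := pv_win_sum_strict (k := l') (l := k) (b := r+1) hpos h (by omega) (by omega)
      rw [hkeq] at h2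
      omega
  · intro heq
    have hl'r : l' ≤ r := by
      by_contra h
      rw [show l' = r + 1 by omega, pv_win_empty le_rfl] at heq
      simp at heq
      omega
    exact ⟨l', by omega, heq⟩

-- ---------- the two loops return None together once no window can match ----------

theorem pv_drop_facts {cy : List Int} {r : Nat} {v : Int} {rest' : List Int}
    (h : v :: rest' = cy.drop r) : r < cy.length ∧ cy[r]? = some v ∧ rest' = cy.drop (r+1) := by
  have hr : r < cy.length := by
    by_contra hc
    rw [List.drop_eq_nil_of_le (by omega)] at h
    exact absurd h.symm (by simp)
  refine ⟨hr, ?_, ?_⟩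
  · rw [← List.head?_drop, ← h]; rfl
  · rw [← List.tail_drop, ← h]; rfl

theorem pv_none_lemma (cy : List Int) (t : Int) (hp : 0 < t) (hpos : ∀ x ∈ cy, 0 < x) :
    ∀ (rest : List Int) (r l : Nat) (mq xq : List Int), rest = cy.drop r → l ≤ r →
    (∀ k, k < l → t < (pvWin cy k r).sum) →
    (∀ r', r ≤ r' → pvMatchAt cy t r' = false) →
    pvGoA cy t rest l (pvWin cy l r).sum mq xq = none ∧
    pvGoB cy t rest r l (pvWin cy l r).sum = none := by
  intro rest
  induction rest with
  | nil => intro r l mq xq _ _ _ _; exact ⟨rfl, rfl⟩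
  | cons v rest' ih =>
    intro r l mq xq hdrop hl hbelow hnom
    obtain ⟨hr, hvq, hrest⟩ := pv_drop_facts hdrop
    have hv : cy[r] = v := by
      have := List.getElem?_eq_getElem hr
      rw [this] at hvq
      exact Option.some.inj hvq
    have hsum : (pvWin cy l r).sum + v = (pvWin cy l (r+1)).sum := by
      rw [pv_win_snoc hl hr, List.sum_append, hv]
      simp
    obtain ⟨l', h1, h2, h3, h4, h5, h6⟩ :=
      pv_shrink_spec cy t hp hpos r hr (cy.length + 1) l (by omega) (by omega)
    obtain ⟨mq', xq', hA⟩ := pv_shrinkA_shape cy t (cy.length + 1) l _ mq xq l' _ h5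
    have hbelow' : ∀ k, k < l' → t < (pvWin cy k (r+1)).sum := by
      intro k hk
      by_cases hkl : k < l
      · have := hbelow k hkl
        rw [pv_win_snoc (by omega) hr, List.sum_append, hv]
        have hv0 : 0 < v := hv ▸ hpos cy[r] (List.getElem_mem hr)
        simp
        omega
      · exact h3 k (by omega) hk
    have hne : (pvWin cy l' (r+1)).sum ≠ t := by
      intro heq
      have := (pv_matchAt_iff hp hpos hr h2 hbelow' h4).mpr heq
      rw [hnom r le_rfl] at this
      exact Bool.noConfusion this
    constructor
    · simp only [pvGoA]
      rw [hsum, hA]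
      simp only [if_neg hne]
      exact (ih (r+1) l' _ _ hrest (by omega) hbelow' (fun r' h => hnom r' (by omega))).1
    · simp only [pvGoB]
      rw [hsum, h5]
      simp only [if_neg hne]
      exact (ih (r+1) l' [] [] hrest (by omega) hbelow' (fun r' h => hnom r' (by omega))).2

-- ---------- main equivalence on the good region ----------

theorem pv_pushMinD (q : List Int) (v : Int) :
    pvPopBack (fun e => decide (v < e)) q ++ [v] = pvPushMin q v := rfl

theorem pv_pushMaxD (q : List Int) (v : Int) :
    pvPopBack (fun e => decide (e < v)) q ++ [v] = pvPushMax q v := rfl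

theorem pv_main_lemma (cy : List Int) (t : Int) (hp : 0 < t) (hpos : ∀ x ∈ cy, 0 < x)
    (hD : ¬ D_find_encryption_weakness_value cy t) :
    ∀ (rest : List Int) (r l : Nat), rest = cy.drop r → l ≤ r →
    (∀ k, k < l → t < (pvWin cy k r).sum) →
    (∀ r', r' < r → pvMatchAt cy t r' = false) →
    (∀ x ∈ cy.take r, x ≤ t) →
    pvGoA cy t rest l (pvWin cy l r).sum (pvDMin (pvWin cy l r)) (pvDMax (pvWin cy l r)) =
      pvGoB cy t rest r l (pvWin cy l r).sum := by
  intro rest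
  induction rest with
  | nil => intro r l _ _ _ _ _; rfl
  | cons v rest' ih =>
    intro r l hdrop hl hbelow hnom hnobig
    obtain ⟨hr, hvq, hrest⟩ := pv_drop_facts hdrop
    have hv : cy[r] = v := by
      have := List.getElem?_eq_getElem hr
      rw [this] at hvq
      exact Option.some.inj hvq
    have hv0 : 0 < v := hv ▸ hpos cy[r] (List.getElem_mem hr)
    have hsum : (pvWin cy l r).sum + v = (pvWin cy l (r+1)).sum := by
      rw [pv_win_snoc hl hr, List.sum_append, hv]
      simp
    obtain ⟨l', h1, h2, h3, h4, h5, h6⟩ :=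
      pv_shrink_spec cy t hp hpos r hr (cy.length + 1) l (by omega) (by omega)
    have hbelow' : ∀ k, k < l' → t < (pvWin cy k (r+1)).sum := by
      intro k hk
      by_cases hkl : k < l
      · have := hbelow k hkl
        rw [pv_win_snoc (by omega) hr, List.sum_append, hv]
        simp
        omega
      · exact h3 k (by omega) hk
    have hmiff := pv_matchAt_iff hp hpos hr h2 hbelow' h4
    have hsumr : (pvWin cy r (r+1)).sum = v := by
      rw [pv_win_cons hr (by omega), pv_win_empty le_rfl, List.sum_cons, hv]
      simp
    by_cases hts : (pvWin cy l' (r+1)).sum = t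
    · -- both return min+max of the matched window
      have hl'r : l' ≤ r := by
        by_contra h
        rw [show l' = r + 1 by omega, pv_win_empty le_rfl] at hts
        simp at hts
        omega
      have hwinsnoc : pvWin cy l' r ++ [v] = pvWin cy l' (r+1) := by
        rw [pv_win_snoc hl'r hr, hv]
      have hwne : pvWin cy l' (r+1) ≠ [] := by
        intro h
        rw [h] at hts
        simp at hts
        omega
      obtain ⟨m, hmh, hmmem, hmmin⟩ := pv_dmin_head_min hwne
      obtain ⟨M, hMh, hMmem, hMmax⟩ := pv_dmax_head_max hwne
      obtain ⟨m', hm'⟩ : ∃ m', PySem.List.min? (pvWin cy l' (r+1)) (fun x => x) = some m' := by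
        rcases h : PySem.List.min? (pvWin cy l' (r+1)) (fun x => x) with _ | m'
        · rw [PySem.List.min?_eq_none_iff] at h
          exact absurd h hwne
        · exact ⟨m', rfl⟩
      obtain ⟨M', hM'⟩ : ∃ M', PySem.List.max? (pvWin cy l' (r+1)) (fun x => x) = some M' := by
        rcases h : PySem.List.max? (pvWin cy l' (r+1)) (fun x => x) with _ | M'
        · rw [PySem.List.max?_eq_none_iff] at h
          exact absurd h hwne
        · exact ⟨M', rfl⟩
      have hmm' : m = m' :=
        le_antisymm (hmmin m' (PySem.List.min?_mem hm'))
          (PySem.List.min?_isMin hm' m hmmem)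
      have hMM' : M = M' :=
        le_antisymm (PySem.List.max?_isMax hM' M hMmem)
          (hMmax M' (PySem.List.max?_mem hM'))
      have hslice : PySem.List.slice cy (some (l' : Int)) (some ((r : Int) + 1)) = pvWin cy l' (r+1) := by
        rw [show ((r : Int) + 1) = (((r+1 : Nat) : Int)) by push_cast; ring, PySem.List.slice_natCast]
        rfl
      simp only [pvGoA, pvGoB]
      rw [hsum, h6, h5]
      simp only [pv_pushMinD, pv_pushMaxD]
      rw [← pv_dmin_snoc, ← pv_dmax_snoc, hwinsnoc]
      simp only [if_pos hts]
      rw [hslice, hm', hM']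
      simp only
      rw [pv_headI_eq hmh, pv_headI_eq hMh, hmm', hMM']
    · by_cases hvle : v ≤ t
      · -- ordinary round: recurse
        have hl'r : l' ≤ r := by
          by_contra h
          have := h3 r (by omega) (by omega)
          rw [hsumr] at this
          omega
        have hwinsnoc : pvWin cy l' r ++ [v] = pvWin cy l' (r+1) := by
          rw [pv_win_snoc hl'r hr, hv]
        have hnom' : ∀ r', r' < r + 1 → pvMatchAt cy t r' = false := by
          intro r' h
          rcases Nat.lt_succ_iff_lt_or_eq.mp h with h | h
          · exact hnom r' h
          · subst h
            rcases hb : pvMatchAt cy t r' with _ | _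
            · rfl
            · exact absurd (hmiff.mp hb) hts
        have hnobig' : ∀ x ∈ cy.take (r+1), x ≤ t := by
          intro x hx
          rw [List.take_add_one, List.getElem?_eq_getElem hr] at hx
          rcases List.mem_append.mp hx with h | h
          · exact hnobig x h
          · simp at h
            rw [h, hv]
            exact hvle
        simp only [pvGoA, pvGoB]
        rw [hsum, h6, h5]
        simp only [pv_pushMinD, pv_pushMaxD]
        rw [← pv_dmin_snoc, ← pv_dmax_snoc, hwinsnoc]
        simp only [if_neg hts]
        exact ih (r+1) l' hrest (by omega) hbelow' hnom' hnobig'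
      · -- an element bigger than the target: no window can match from now on
        have hl'' : l' = r + 1 := by
          by_contra h
          have hler : l' ≤ r := by omega
          have := pv_win_sum_mono hpos (r+1) hler
          rw [hsumr] at this
          omega
        have hbelow'' : ∀ k, k < r + 1 → t < (pvWin cy k (r+1)).sum := hl'' ▸ hbelow'
        have hnomatch : ∀ r', r + 1 ≤ r' → pvMatchAt cy t r' = false := by
          intro r' hr'
          rcases hb : pvMatchAt cy t r' with _ | _
          · rfl
          exfalso
          have hex : ∃ n, pvMatchAt cy t n = true := ⟨r', hb⟩
          -- a matching window that fits inside the list exists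
          have hexlen : ∃ n, n < cy.length ∧ pvMatchAt cy t n = true := by
            by_cases hlen : r' < cy.length
            · exact ⟨r', hlen, hb⟩
            · unfold pvMatchAt at hb
              simp only [List.any_eq_true, List.mem_range, decide_eq_true_eq] at hb
              obtain ⟨k, hk, hkeq⟩ := hb
              have hklen : k < cy.length := by
                by_contra hc
                rw [pv_win_drop_nil (by omega)] at hkeq
                simp at hkeq
                omega
              have hlpos : 0 < cy.length := by omega
              refine ⟨cy.length - 1, by omega, ?_⟩
              unfold pvMatchAt
              simp only [List.any_eq_true, List.mem_range, decide_eq_true_eq]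
              refine ⟨k, by omega, ?_⟩
              rw [show cy.length - 1 + 1 = cy.length by omega, ← pv_win_clamp (show cy.length ≤ r' + 1 by omega)]
              exact hkeq
          obtain ⟨n1, hn1len, hn1⟩ := hexlen
          have hfind := Nat.find_spec hex
          have hfindle : Nat.find hex ≤ n1 := Nat.find_min' hex hn1
          have hfindge : r + 1 ≤ Nat.find hex := by
            by_contra hc
            have hlt : Nat.find hex < r + 1 := by omega
            rcases Nat.lt_succ_iff_lt_or_eq.mp hlt with h | h
            · rw [hnom _ h] at hfind
              exact Bool.noConfusion hfind
            · rw [h] at hfind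
              exact hts (hmiff.mp hfind)
          apply hD
          refine ⟨hp, hpos, Nat.find hex, by omega, (pvM_iff cy t _).mpr hfind, ?_, ?_⟩
          · intro j hj
            rw [pvM_iff]
            exact Nat.find_min hex hj
          · refine ⟨cy[r], ?_, by rw [hv]; exact not_le.mp hvle⟩
            have hrtake : r < (cy.take (Nat.find hex)).length := by
              have hx1 : r < cy.length := hr
              have hx2 : r + 1 ≤ Nat.find hex := hfindge
              simp only [List.length_take]
              omega
            have := List.getElem_mem hrtake
            rwa [List.getElem_take] at this
        -- both sides run to the end and return None
        obtain ⟨mq'', xq'', hA⟩ :=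
          pv_shrinkA_shape cy t (cy.length + 1) l _ (pvDMin (pvWin cy l r)) (pvDMax (pvWin cy l r)) l' _ h5
        simp only [pvGoA, pvGoB]
        rw [hsum, hA, h5]
        simp only [if_neg hts]
        rw [(pv_none_lemma cy t hp hpos rest' (r+1) l' _ _ hrest (by omega) (hl'' ▸ hbelow'')
              hnomatch).1,
            (pv_none_lemma cy t hp hpos rest' (r+1) l' [] [] hrest (by omega) (hl'' ▸ hbelow'')
              hnomatch).2]

-- ---------- the no-shrink region: prefix sums never exceed the target ----------

theorem pv_calm_lemma (cy : List Int) (t : Int)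
    (hpre : ∀ r < cy.length, (cy.take (r+1)).sum ≤ t) :
    ∀ (rest : List Int) (r : Nat), rest = cy.drop r →
    pvGoA cy t rest 0 (pvWin cy 0 r).sum (pvDMin (pvWin cy 0 r)) (pvDMax (pvWin cy 0 r)) =
      pvGoB cy t rest r 0 (pvWin cy 0 r).sum := by
  intro rest
  induction rest with
  | nil => intro r _; rfl
  | cons v rest' ih =>
    intro r hdrop
    obtain ⟨hr, hvq, hrest⟩ := pv_drop_facts hdrop
    have hv : cy[r] = v := by
      have := List.getElem?_eq_getElem hr
      rw [this] at hvq
      exact Option.some.inj hvq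
    have hsum : (pvWin cy 0 r).sum + v = (pvWin cy 0 (r+1)).sum := by
      rw [pv_win_snoc (by omega) hr, List.sum_append, hv]
      simp
    have hle : (pvWin cy 0 (r+1)).sum ≤ t := by
      have := hpre r hr
      simpa [pvWin] using this
    have hwinsnoc : pvWin cy 0 r ++ [v] = pvWin cy 0 (r+1) := by
      rw [pv_win_snoc (by omega) hr, hv]
    simp only [pvGoA, pvGoB]
    rw [hsum]
    simp only [pvShrinkA, pvShrinkB, if_neg (not_lt.mpr hle)]
    simp only [pv_pushMinD, pv_pushMaxD]
    rw [← pv_dmin_snoc, ← pv_dmax_snoc, hwinsnoc]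
    by_cases hts : (pvWin cy 0 (r+1)).sum = t
    · simp only [if_pos hts]
      have hwne : pvWin cy 0 (r+1) ≠ [] := by
        intro h
        have hlen := congrArg List.length h
        simp only [pvWin, List.length_take, List.length_drop, List.length_nil] at hlen
        omega
      obtain ⟨m, hmh, hmmem, hmmin⟩ := pv_dmin_head_min hwne
      obtain ⟨M, hMh, hMmem, hMmax⟩ := pv_dmax_head_max hwne
      obtain ⟨m', hm'⟩ : ∃ m', PySem.List.min? (pvWin cy 0 (r+1)) (fun x => x) = some m' := by
        rcases h : PySem.List.min? (pvWin cy 0 (r+1)) (fun x => x) with _ | m'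
        · rw [PySem.List.min?_eq_none_iff] at h
          exact absurd h hwne
        · exact ⟨m', rfl⟩
      obtain ⟨M', hM'⟩ : ∃ M', PySem.List.max? (pvWin cy 0 (r+1)) (fun x => x) = some M' := by
        rcases h : PySem.List.max? (pvWin cy 0 (r+1)) (fun x => x) with _ | M'
        · rw [PySem.List.max?_eq_none_iff] at h
          exact absurd h hwne
        · exact ⟨M', rfl⟩
      have hmm' : m = m' :=
        le_antisymm (hmmin m' (PySem.List.min?_mem hm'))
          (PySem.List.min?_isMin hm' m hmmem)
      have hMM' : M = M' :=
        le_antisymm (PySem.List.max?_isMax hM' M hMmem)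
          (hMmax M' (PySem.List.max?_mem hM'))
      have hslice : PySem.List.slice cy (some ((0 : Nat) : Int)) (some ((r : Int) + 1)) = pvWin cy 0 (r+1) := by
        rw [show ((r : Int) + 1) = (((r+1 : Nat) : Int)) by push_cast; ring, PySem.List.slice_natCast]
        rfl
      rw [hslice, hm', hM']
      simp only
      rw [pv_headI_eq hmh, pv_headI_eq hMh, hmm', hMM']
    · simp only [if_neg hts]
      exact ih (r+1) hrest

-- ---------- tightness: inside D_ the stale max-deque front always shows ----------

def pvIMin (cy : List Int) (t : Int) (l r : Nat) (mq : List Int) : Prop :=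
  mq = pvDMin (pvWin cy l r) ∨ (pvWin cy l r = [] ∧ ∀ e ∈ mq, t < e)

def pvSortedD (xq : List Int) : Prop := List.Pairwise (fun a b => b ≤ a) xq

def pvIMax (t : Int) (xq : List Int) : Prop := ∃ h, xq.head? = some h ∧ t < h

theorem pv_getD_eq {cy : List Int} {j : Nat} (h : j < cy.length) : cy.getD j 0 = cy[j] := by
  simp [List.getD_eq_getElem?_getD, List.getElem?_eq_getElem h]

theorem pv_dropWhile_head_false {p : Int → Bool} :
    ∀ (l : List Int) {x : Int}, (l.dropWhile p).head? = some x → p x = false := by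
  intro l
  induction l with
  | nil => intro x h; simp at h
  | cons a tl ih =>
    intro x h
    by_cases hp : p a = true
    · rw [List.dropWhile_cons_of_pos hp] at h
      exact ih h
    · rw [List.dropWhile_cons_of_neg (by simpa using hp)] at h
      have : a = x := by simpa using h
      rw [← this]
      simpa using hp

theorem pv_popBack_prefix (p : Int → Bool) (q : List Int) : pvPopBack p q <+: q := by
  unfold pvPopBack
  obtain ⟨pre, hpre⟩ := List.dropWhile_suffix (l := q.reverse) p
  refine ⟨pre.reverse, ?_⟩
  have := congrArg List.reverse hpre
  simpa using this

theorem pv_popBack_mem_ge {v : Int} {q : List Int} (hs : pvSortedD q) :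
    ∀ x ∈ pvPopBack (fun e => decide (e < v)) q, v ≤ x := by
  intro x hx
  unfold pvPopBack at hx
  have hxs : x ∈ q.reverse.dropWhile (fun e => decide (e < v)) := by simpa using hx
  have hsorted : (q.reverse.dropWhile (fun e => decide (e < v))).Pairwise (· ≤ ·) := by
    refine List.Pairwise.sublist (List.dropWhile_suffix _).sublist ?_
    exact (List.pairwise_reverse).mpr hs
  obtain ⟨y, ys, hy⟩ := List.exists_cons_of_ne_nil (List.ne_nil_of_mem hxs)
  have hyhead : (q.reverse.dropWhile (fun e => decide (e < v))).head? = some y := by rw [hy]; rfl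
  have hyv : v ≤ y := by simpa using pv_dropWhile_head_false _ hyhead
  rw [hy] at hxs hsorted
  rcases List.mem_cons.mp hxs with h | h
  · omega
  · have := (List.pairwise_cons.mp hsorted).1 x h
    omega

theorem pv_pushMax_def (q : List Int) (v : Int) :
    pvPushMax q v = pvPopBack (fun e => decide (e < v)) q ++ [v] := rfl

theorem pv_pushMax_sorted {q : List Int} (hs : pvSortedD q) (v : Int) :
    pvSortedD (pvPushMax q v) := by
  rw [pv_pushMax_def]
  unfold pvSortedD
  rw [List.pairwise_append]
  refine ⟨List.Pairwise.sublist (pv_popBack_prefix _ _).sublist hs, by simp, ?_⟩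
  intro a ha b hb
  have : b = v := by simpa using hb
  rw [this]
  exact pv_popBack_mem_ge hs a ha

theorem pv_sorted_head_max {q : List Int} (hs : pvSortedD q) {h x : Int}
    (hh : q.head? = some h) (hx : x ∈ q) : x ≤ h := by
  cases q with
  | nil => simp at hx
  | cons a tl =>
    have ha : a = h := by simpa using hh
    rcases List.mem_cons.mp hx with h1 | h1
    · omega
    · have := (List.pairwise_cons.mp hs).1 x h1
      omega

theorem pv_head_popBack_append (p : Int → Bool) (q : List Int) (z : Int)
    (h : ∃ e ∈ q, p e = false) :
    (pvPopBack p q ++ [z]).head? = q.head? := by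
  unfold pvPopBack
  have hne : q.reverse.dropWhile p ≠ [] := by
    intro hnil
    rcases h with ⟨e, he, hez⟩
    have := List.dropWhile_eq_nil_iff.mp hnil e (by simpa using he)
    simp_all
  obtain ⟨pre, hpre⟩ := List.dropWhile_suffix (l := q.reverse) p
  have hq : q = (q.reverse.dropWhile p).reverse ++ pre.reverse := by
    have := congrArg List.reverse hpre
    simpa using this.symm
  have hsr : (q.reverse.dropWhile p).reverse ≠ [] := by simpa using hne
  obtain ⟨a, as, ha⟩ := List.exists_cons_of_ne_nil hsr
  rw [ha]
  conv_rhs => rw [hq, ha]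
  simp

theorem pv_pushMax_all_lt {q : List Int} {v : Int} (h : ∀ e ∈ q, e < v) :
    pvPushMax q v = [v] := by
  rw [pv_pushMax_def, pv_popBack_all (by intro e he; simpa using h e he)]
  rfl

theorem pv_IMax_push_small {t : Int} {xq : List Int} (him : pvIMax t xq) {v : Int} (hv : v ≤ t) :
    pvIMax t (pvPushMax xq v) := by
  obtain ⟨h, hh, hht⟩ := him
  refine ⟨h, ?_, hht⟩
  rw [pv_pushMax_def, pv_head_popBack_append _ _ _ ⟨h, List.mem_of_mem_head? hh, by simp; omega⟩]
  exact hh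

theorem pv_IMax_push_big {t : Int} {xq : List Int} (hs : pvSortedD xq) {v : Int} (hv : t < v) :
    pvIMax t (pvPushMax xq v) := by
  by_cases hall : ∀ e ∈ xq, e < v
  · rw [pv_pushMax_all_lt hall]
    exact ⟨v, rfl, hv⟩
  · push_neg at hall
    obtain ⟨e, he, hev⟩ := hall
    obtain ⟨a, as, ha⟩ := List.exists_cons_of_ne_nil (List.ne_nil_of_mem he)
    have hh : xq.head? = some a := by rw [ha]; rfl
    have hae : e ≤ a := pv_sorted_head_max hs hh he
    refine ⟨a, ?_, by omega⟩
    rw [pv_pushMax_def, pv_head_popBack_append _ _ _ ⟨e, he, by simp; omega⟩]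
    exact hh

theorem pv_sorted_popFrontEq {xq : List Int} (hs : pvSortedD xq) (u : Int) :
    pvSortedD (if xq.head? = some u then xq.tail else xq) := by
  split
  · cases xq with
    | nil => exact hs
    | cons a tl => exact (List.pairwise_cons.mp hs).2
  · exact hs

theorem pv_IMax_popFrontEq_small {t : Int} {xq : List Int} (him : pvIMax t xq) {u : Int}
    (hu : u ≤ t) : pvIMax t (if xq.head? = some u then xq.tail else xq) := by
  obtain ⟨h, hh, hht⟩ := him
  rw [hh, if_neg (by simp; omega)]
  exact ⟨h, hh, hht⟩

theorem pv_IMin_step {cy : List Int} {t : Int} {l r : Nat} {mq : List Int}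
    (hm : pvIMin cy t l r mq) (hllen : l < cy.length) :
    pvIMin cy t (l+1) r (if mq.head? = some cy[l] then mq.tail else mq) := by
  rcases hm with hm | ⟨hw, hme⟩
  · by_cases hlr : l < r
    · left
      rw [hm, pv_win_cons hllen hlr]
      exact pv_frontpop_min _ _
    · have h1 : pvWin cy l r = [] := pv_win_empty (by omega)
      have h2 : pvWin cy (l+1) r = [] := pv_win_empty (by omega)
      left
      rw [hm, h1, h2]
      simp [pvDMin]
  · right
    refine ⟨pv_win_empty ?_, ?_⟩
    · have := congrArg List.length hw
      simp only [pvWin, List.length_take, List.length_drop, List.length_nil] at this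
      omega
    · intro e he
      split at he
      · exact hme e (List.mem_of_mem_tail he)
      · exact hme e he

theorem pv_mem_le_sum {w : List Int} (hpos : ∀ y ∈ w, 0 < y) {x : Int} (hx : x ∈ w) :
    x ≤ w.sum := by
  induction w with
  | nil => simp at hx
  | cons a tl ih =>
    rw [List.sum_cons]
    rcases List.mem_cons.mp hx with h | h
    · have : 0 ≤ tl.sum := by
        have : ∀ y ∈ tl, 0 < y := fun y hy => hpos y (by simp [hy])
        exact List.sum_nonneg (fun y hy => le_of_lt (this y hy))
      omega
    · have := ih (fun y hy => hpos y (by simp [hy])) h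
      have := hpos a (by simp)
      omega

theorem pv_win_subset_left {cy : List Int} {r : Nat} : ∀ {l l' : Nat}, l ≤ l' →
    ∀ x ∈ pvWin cy l' r, x ∈ pvWin cy l r := by
  intro l l' hll
  induction l', hll using Nat.le_induction with
  | base => intro x hx; exact hx
  | succ n hn ih =>
    intro x hx
    apply ih
    by_cases h1 : n < cy.length
    · by_cases h2 : n < r
      · rw [pv_win_cons h1 h2]
        simp [hx]
      · rw [pv_win_empty (show r ≤ n + 1 by omega)] at hx
        simp at hx
    · rw [pv_win_drop_nil (show cy.length ≤ n + 1 by omega)] at hx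
      simp at hx

theorem pv_shrink_dirty (cy : List Int) (t : Int) (hp : 0 < t) (hpos : ∀ x ∈ cy, 0 < x)
    (r : Nat) (hr : r < cy.length) :
    ∀ fuel l (mq xq : List Int), cy.length + 1 ≤ fuel + l → l ≤ r + 1 →
    pvIMin cy t l r mq → pvSortedD xq → (∀ u ∈ pvWin cy l r, u ≤ t) →
    (r < l ∨ pvIMax t xq) →
    ∃ l' mq' xq', l ≤ l' ∧ l' ≤ r + 1 ∧
      (∀ k, l ≤ k → k < l' → t < (pvWin cy k (r+1)).sum) ∧
      (pvWin cy l' (r+1)).sum ≤ t ∧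
      pvShrinkB cy t fuel l (pvWin cy l (r+1)).sum = some (l', (pvWin cy l' (r+1)).sum) ∧
      pvShrinkA cy t fuel l (pvWin cy l (r+1)).sum mq xq = some (l', (pvWin cy l' (r+1)).sum, mq', xq') ∧
      pvIMin cy t l' r mq' ∧ pvSortedD xq' ∧ (l' ≤ r → pvIMax t xq') := by
  intro fuel
  induction fuel with
  | zero => intro l mq xq hf hl; omega
  | succ fuel ih =>
    intro l mq xq hf hl him hsx hiw himax
    by_cases hts : (pvWin cy l (r+1)).sum > t
    · have hlr : l ≤ r := by
        by_contra h
        rw [show l = r + 1 by omega, pv_win_empty le_rfl] at hts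
        simp at hts
        omega
      have hllen : l < cy.length := by omega
      have hget : PySem.List.pyGet? cy (l : Int) = some cy[l] := by
        rw [PySem.List.pyGet?_natCast]
        exact List.getElem?_eq_getElem hllen
      have hsum : (pvWin cy l (r+1)).sum - cy[l] = (pvWin cy (l+1) (r+1)).sum := by
        rw [pv_win_cons hllen (by omega), List.sum_cons]
        ring
      have hiw' : ∀ u ∈ pvWin cy (l+1) r, u ≤ t := fun u hu =>
        hiw u (pv_win_subset_left (by omega) u hu)
      have himax' : r < l + 1 ∨ pvIMax t (if xq.head? = some cy[l] then xq.tail else xq) := by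
        by_cases hlr2 : l < r
        · right
          have hut : cy[l] ≤ t := hiw cy[l] (by rw [pv_win_cons hllen hlr2]; simp)
          exact pv_IMax_popFrontEq_small (himax.resolve_left (by omega)) hut
        · left; omega
      obtain ⟨l', mq', xq', h1, h2, h3, h4, h5, h6, h7, h8, h9⟩ :=
        ih (l+1) (if mq.head? = some cy[l] then mq.tail else mq)
          (if xq.head? = some cy[l] then xq.tail else xq) (by omega) (by omega)
          (pv_IMin_step him hllen) (pv_sorted_popFrontEq hsx cy[l]) hiw' himax'
      refine ⟨l', mq', xq', by omega, h2, ?_, h4, ?_, ?_, h7, h8, h9⟩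
      · intro k hk1 hk2
        rcases eq_or_lt_of_le hk1 with h | h
        · exact h ▸ hts
        · exact h3 k h hk2
      · simp only [pvShrinkB, if_pos hts, hget]
        rw [hsum]
        exact h5
      · simp only [pvShrinkA, if_pos hts, hget]
        rw [hsum]
        exact h6
    · refine ⟨l, mq, xq, le_rfl, hl, by omega, not_lt.mp hts, ?_, ?_, him, hsx, ?_⟩
      · simp only [pvShrinkB, if_neg hts]
      · simp only [pvShrinkA, if_neg hts]
      · intro hlr
        exact himax.resolve_left (by omega)

theorem pv_tight_lemma (cy : List Int) (t : Int) (hp : 0 < t) (hpos : ∀ x ∈ cy, 0 < x)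
    (rs : Nat) (hrslen : rs < cy.length) (hM : pvMatchAt cy t rs = true)
    (hfirst : ∀ j < rs, pvMatchAt cy t j = false)
    (i1 : Nat) (hi1rs : i1 < rs) (hbig : t < cy.getD i1 0)
    (hmin1 : ∀ j < i1, cy.getD j 0 ≤ t) :
    ∀ (rest : List Int) (r l : Nat) (mq xq : List Int), rest = cy.drop r → l ≤ r → r ≤ rs →
    (∀ k, k < l → t < (pvWin cy k r).sum) →
    (∀ u ∈ pvWin cy l r, u ≤ t) →
    ((r ≤ i1 ∧ mq = pvDMin (pvWin cy l r) ∧ xq = pvDMax (pvWin cy l r)) ∨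
      (i1 < r ∧ pvIMin cy t l r mq ∧ pvSortedD xq ∧ pvIMax t xq)) →
    pvGoA cy t rest l (pvWin cy l r).sum mq xq ≠ pvGoB cy t rest r l (pvWin cy l r).sum := by
  intro rest
  induction rest with
  | nil =>
    intro r l mq xq hdrop hlr hrrs
    exfalso
    have : cy.drop r = [] := hdrop.symm
    rw [List.drop_eq_nil_iff] at this
    omega
  | cons v rest' ih =>
    intro r l mq xq hdrop hl hrrs hbelow hiw hphase
    obtain ⟨hr, hvq, hrest⟩ := pv_drop_facts hdrop
    have hv : cy[r] = v := by
      have := List.getElem?_eq_getElem hr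
      rw [this] at hvq
      exact Option.some.inj hvq
    have hv0 : 0 < v := hv ▸ hpos cy[r] (List.getElem_mem hr)
    have hsum : (pvWin cy l r).sum + v = (pvWin cy l (r+1)).sum := by
      rw [pv_win_snoc hl hr, List.sum_append, hv]
      simp
    have hsumr : (pvWin cy r (r+1)).sum = v := by
      rw [pv_win_cons hr (by omega), pv_win_empty le_rfl, List.sum_cons, hv]
      simp
    rcases hphase with ⟨hri1, hmq, hxq⟩ | ⟨hri1, him, hsx, himx⟩
    · -- clean phase (r ≤ i1 < rs, so this round never returns)
      obtain ⟨l', h1, h2, h3, h4, h5, h6⟩ :=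
        pv_shrink_spec cy t hp hpos r hr (cy.length + 1) l (by omega) (by omega)
      have hbelow' : ∀ k, k < l' → t < (pvWin cy k (r+1)).sum := by
        intro k hk
        by_cases hkl : k < l
        · have := hbelow k hkl
          rw [pv_win_snoc (by omega) hr, List.sum_append, hv]
          simp
          omega
        · exact h3 k (by omega) hk
      have hmiff := pv_matchAt_iff hp hpos hr h2 hbelow' h4
      have hts : (pvWin cy l' (r+1)).sum ≠ t := by
        intro heq
        have := hmiff.mpr heq
        rw [hfirst r (by omega)] at this
        exact Bool.noConfusion this
      rw [hmq, hxq]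
      simp only [pvGoA, pvGoB]
      rw [hsum, h6, h5]
      simp only [pv_pushMinD, pv_pushMaxD]
      simp only [if_neg hts]
      by_cases hv2 : v ≤ t
      · have hri1' : r < i1 := by
          rcases eq_or_lt_of_le hri1 with h | h
          · exfalso
            have hb2 := hbig
            rw [← h, pv_getD_eq hr, hv] at hb2
            omega
          · omega
        have hl'r : l' ≤ r := by
          by_contra h
          have := h3 r (by omega) (by omega)
          rw [hsumr] at this
          omega
        have hwinsnoc : pvWin cy l' r ++ [v] = pvWin cy l' (r+1) := by
          rw [pv_win_snoc hl'r hr, hv]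
        rw [← pv_dmin_snoc, ← pv_dmax_snoc, hwinsnoc]
        refine ih (r+1) l' _ _ hrest (by omega) (by omega) hbelow' ?_ ?_
        · intro u hu
          rcases List.mem_append.mp (hwinsnoc ▸ hu) with h | h
          · exact hiw u (pv_win_subset_left h1 u h)
          · simp at h; omega
        · exact Or.inl ⟨by omega, rfl, rfl⟩
      · -- the first oversized element: switch to the dirty phase
        have hl'' : l' = r + 1 := by
          by_contra h
          have hler : l' ≤ r := by omega
          have := pv_win_sum_mono hpos (r+1) hler
          rw [hsumr] at this
          omega
        have hwe : pvWin cy l' r = [] := pv_win_empty (by omega)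
        rw [hwe]
        have hdm : pvDMin ([] : List Int) = [] := rfl
        have hdx : pvDMax ([] : List Int) = [] := rfl
        rw [hdm, hdx]
        have hpm : pvPushMin [] v = [v] := rfl
        have hpx : pvPushMax [] v = [v] := rfl
        rw [hpm, hpx]
        have hi1r : i1 ≤ r := by
          by_contra hcon
          have hj := hmin1 r (by omega)
          rw [pv_getD_eq hr, hv] at hj
          omega
        refine ih (r+1) l' _ _ hrest (by omega) (by omega) hbelow' ?_ ?_
        · rw [show pvWin cy l' (r+1) = [] from hl'' ▸ pv_win_empty le_rfl]
          intro u hu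
          simp at hu
        · refine Or.inr ⟨by omega, Or.inr ⟨hl'' ▸ pv_win_empty le_rfl, ?_⟩, ?_, ⟨v, rfl, by omega⟩⟩
          · intro e he
            simp at he
            omega
          · exact List.pairwise_singleton _ v
    · -- dirty phase
      obtain ⟨l', mq0, xq0, h1, h2, h3, h4, h5, h6, h7, h8, h9⟩ :=
        pv_shrink_dirty cy t hp hpos r hr (cy.length + 1) l mq xq (by omega) (by omega)
          him hsx hiw (Or.inr himx)
      have hbelow' : ∀ k, k < l' → t < (pvWin cy k (r+1)).sum := by
        intro k hk
        by_cases hkl : k < l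
        · have := hbelow k hkl
          rw [pv_win_snoc (by omega) hr, List.sum_append, hv]
          simp
          omega
        · exact h3 k (by omega) hk
      have hmiff := pv_matchAt_iff hp hpos hr h2 hbelow' h4
      simp only [pvGoA, pvGoB]
      rw [hsum, h6, h5]
      simp only [pv_pushMinD, pv_pushMaxD]
      by_cases hts : (pvWin cy l' (r+1)).sum = t
      · -- the match round: A's max front is stale (> t), B's max is an element (≤ t)
        have hl'r : l' ≤ r := by
          by_contra h
          rw [show l' = r + 1 by omega, pv_win_empty le_rfl] at hts
          simp at hts
          omega
        have hwinsnoc : pvWin cy l' r ++ [v] = pvWin cy l' (r+1) := by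
          rw [pv_win_snoc hl'r hr, hv]
        have hwpos : ∀ y ∈ pvWin cy l' (r+1), 0 < y := by
          intro y hy
          unfold pvWin at hy
          exact hpos y (List.mem_of_mem_drop (List.mem_of_mem_take hy))
        have hvmem : v ∈ pvWin cy l' (r+1) := by
          rw [← hwinsnoc]
          simp
        have hv2 : v ≤ t := by
          have := pv_mem_le_sum hwpos hvmem
          omega
        -- A's min queue healed: it is the deque of the true window
        have hmq' : pvPushMin mq0 v = pvDMin (pvWin cy l' (r+1)) := by
          rcases h7 with h7 | ⟨hwe, hme⟩
          · rw [h7, ← pv_dmin_snoc, hwinsnoc]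
          · rw [pv_pushMin_all_gt (fun e he => by have := hme e he; omega)]
            have hlr' : l' = r := by
              have := congrArg List.length hwe
              simp only [pvWin, List.length_take, List.length_drop, List.length_nil] at this
              omega
            rw [show pvWin cy l' (r+1) = [v] by
              rw [hlr', pv_win_cons hr (by omega), pv_win_empty le_rfl, hv]]
            rfl
        have himx' : pvIMax t (pvPushMax xq0 v) := pv_IMax_push_small (h9 hl'r) hv2
        obtain ⟨hx, hhx, hhxt⟩ := himx'
        have hwne : pvWin cy l' (r+1) ≠ [] := by
          intro h
          rw [h] at hts
          simp at hts
          omega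
        obtain ⟨m, hmh, hmmem, hmmin⟩ := pv_dmin_head_min hwne
        obtain ⟨m', hm'⟩ : ∃ m', PySem.List.min? (pvWin cy l' (r+1)) (fun x => x) = some m' := by
          rcases h : PySem.List.min? (pvWin cy l' (r+1)) (fun x => x) with _ | m'
          · rw [PySem.List.min?_eq_none_iff] at h
            exact absurd h hwne
          · exact ⟨m', rfl⟩
        obtain ⟨M', hM'⟩ : ∃ M', PySem.List.max? (pvWin cy l' (r+1)) (fun x => x) = some M' := by
          rcases h : PySem.List.max? (pvWin cy l' (r+1)) (fun x => x) with _ | M'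
          · rw [PySem.List.max?_eq_none_iff] at h
            exact absurd h hwne
          · exact ⟨M', rfl⟩
        have hmm' : m = m' :=
          le_antisymm (hmmin m' (PySem.List.min?_mem hm'))
            (PySem.List.min?_isMin hm' m hmmem)
        have hM't : M' ≤ t := by
          have h1 := pv_mem_le_sum hwpos (PySem.List.max?_mem hM')
          omega
        have hslice : PySem.List.slice cy (some (l' : Int)) (some ((r : Int) + 1)) = pvWin cy l' (r+1) := by
          rw [show ((r : Int) + 1) = (((r+1 : Nat) : Int)) by push_cast; ring, PySem.List.slice_natCast]
          rfl
        simp only [if_pos hts]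
        rw [hmq', hslice, hm', hM']
        simp only
        rw [pv_headI_eq hmh, pv_headI_eq hhx]
        intro heq
        have := Option.some.inj heq
        omega
      · -- no match this round: recurse, staying dirty
        have hrrs' : r < rs := by
          rcases eq_or_lt_of_le hrrs with h | h
          · exfalso
            subst h
            exact hts (hmiff.mp hM)
          · omega
        simp only [if_neg hts]
        have hcase : l' ≤ r ∨ l' = r + 1 := by omega
        have hvbig : l' = r + 1 → t < v := by
          intro h
          have := h3 r (by omega) (by omega)
          rw [hsumr] at this
          exact this
        have hIMin' : pvIMin cy t l' (r+1) (pvPushMin mq0 v) := by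
          rcases hcase with hc | hc
          · have hv2 : v ≤ t := by
              by_contra hvt
              have := pv_win_sum_mono hpos (r+1) hc
              rw [hsumr] at this
              have := h4
              omega
            left
            rcases h7 with h7 | ⟨hwe, hme⟩
            · rw [h7, ← pv_dmin_snoc, pv_win_snoc hc hr, hv]
            · rw [pv_pushMin_all_gt (fun e he => by have := hme e he; omega)]
              have hlr' : l' = r := by
                have := congrArg List.length hwe
                simp only [pvWin, List.length_take, List.length_drop, List.length_nil] at this
                omega
              rw [show pvWin cy l' (r+1) = [v] by
                rw [hlr', pv_win_cons hr (by omega), pv_win_empty le_rfl, hv]]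
              rfl
          · right
            refine ⟨hc ▸ pv_win_empty le_rfl, ?_⟩
            intro e he
            rcases pv_mem_pushMin he with h | h
            · have := hvbig hc; omega
            · rcases h7 with h7 | ⟨hwe, hme⟩
              · rw [h7, show pvWin cy l' r = [] from pv_win_empty (by omega)] at h
                simp [pvDMin] at h
              · exact hme e h
        have hIMax' : pvIMax t (pvPushMax xq0 v) := by
          rcases hcase with hc | hc
          · have hv2 : v ≤ t := by
              by_contra hvt
              have := pv_win_sum_mono hpos (r+1) hc
              rw [hsumr] at this
              have := h4
              omega
            exact pv_IMax_push_small (h9 hc) hv2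
          · exact pv_IMax_push_big h8 (hvbig hc)
        have hiw' : ∀ u ∈ pvWin cy l' (r+1), u ≤ t := by
          rcases hcase with hc | hc
          · have hv2 : v ≤ t := by
              by_contra hvt
              have := pv_win_sum_mono hpos (r+1) hc
              rw [hsumr] at this
              have := h4
              omega
            intro u hu
            rw [pv_win_snoc hc hr, hv] at hu
            rcases List.mem_append.mp hu with h | h
            · exact hiw u (pv_win_subset_left h1 u h)
            · simp at h; omega
          · rw [hc, pv_win_empty le_rfl]
            intro u hu
            simp at hu
        exact ih (r+1) l' _ _ hrest (by omega) (by omega) hbelow' hiw'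
          (Or.inr ⟨by omega, hIMin', pv_pushMax_sorted h8 v, hIMax'⟩)

-- ===== VERDICT (by name: the statement is the Claim_ definition above) =====
theorem find_encryption_weakness_value_spec : Claim_unchanged_find_encryption_weakness_value := by
  unfold Claim_unchanged_find_encryption_weakness_value Spec_find_encryption_weakness_value
  intro cy t _ hpre hD
  unfold find_encryption_weakness_value find_encryption_weakness_value_alt
  rcases hpre with ⟨hp, hpos⟩ | hcalm
  · have h := pv_main_lemma cy t hp hpos hD cy 0 0 (by simp) le_rfl
      (by intro k hk; omega) (by intro r' h; omega) (by simp)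
    simpa [pvWin, pvDMin, pvDMax] using h
  · have h := pv_calm_lemma cy t hcalm cy 0 (by simp)
    simpa [pvWin, pvDMin, pvDMax] using h

theorem find_encryption_weakness_value_changed : Claim_changed_find_encryption_weakness_value := by
  unfold Claim_changed_find_encryption_weakness_value; decide

theorem find_encryption_weakness_value_tight : Claim_exact_find_encryption_weakness_value := by
  unfold Claim_exact_find_encryption_weakness_value
  intro cy t _ _ hD
  obtain ⟨hp, hpos, rs, hrslen, hMex, hfirstex, x, hxmem, hxgt⟩ := hD
  have hM : pvMatchAt cy t rs = true := (pvM_iff cy t rs).mp hMex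
  have hfirst : ∀ j < rs, pvMatchAt cy t j = false := by
    intro j hj
    cases hb : pvMatchAt cy t j with
    | false => rfl
    | true => exact absurd ((pvM_iff cy t j).mpr hb) (hfirstex j hj)
  obtain ⟨i, hi, hieq⟩ := List.getElem_of_mem hxmem
  have hi' : i < rs ∧ i < cy.length := by
    simp only [List.length_take] at hi
    omega
  have hib : t < cy[i]'(hi'.2) := by
    rw [List.getElem_take] at hieq
    rw [hieq]
    exact hxgt
  have hexP : ∃ j, j < cy.length ∧ t < cy.getD j 0 := by
    refine ⟨i, hi'.2, ?_⟩
    rw [pv_getD_eq hi'.2]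
    exact hib
  have hi1len : Nat.find hexP < cy.length := (Nat.find_spec hexP).1
  have hi1big : t < cy.getD (Nat.find hexP) 0 := (Nat.find_spec hexP).2
  have hi1rs : Nat.find hexP < rs := by
    have := Nat.find_min' hexP ⟨hi'.2, by rw [pv_getD_eq hi'.2]; exact hib⟩
    omega
  have hmin1 : ∀ j < Nat.find hexP, cy.getD j 0 ≤ t := by
    intro j hj
    have h2 := Nat.find_min hexP hj
    push_neg at h2
    exact h2 (by omega)
  have h := pv_tight_lemma cy t hp hpos rs hrslen hM hfirst (Nat.find hexP) hi1rs
    hi1big hmin1 cy 0 0 [] [] (by simp) le_rfl (by omega)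
    (by intro k hk; omega) (by intro u hu; rw [pv_win_empty le_rfl] at hu; simp at hu)
    (Or.inl ⟨by omega, rfl, rfl⟩)
  unfold find_encryption_weakness_value find_encryption_weakness_value_alt
  simpa [pvWin, pvDMin, pvDMax] using h
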